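-- pv_equiv track=rewrite | github.com/ViniGarcia/NFV-FLERAS | YAMLR/YAMLRComposition.py | __ycBranch
-- ===== SOURCE A (Python) =====
-- def __ycBranch(elementsList, start):
--
-- 	skipBrace = 0
-- 	segments = 0
-- 	for index in range(start+1, len(elementsList)):
--
-- 		if elementsList[index] == "}":
-- 			if skipBrace == 0:
-- 				return segments + 1
-- 			else:
-- 				skipBrace -= 1
-- 			continue
--
-- 		if elementsList[index] == "{":
-- 			skipBrace += 1
-- 			continue
--
-- 		if elementsList[index] == "/":
-- 			if skipBrace == 0:
-- 				segments += 1
-- ===== SOURCE B (Python) =====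
-- def __ycBranch(elementsList, start):
-- 	# Pass 1: find the index of the matching closing brace at depth 0.
-- 	depth = 0
-- 	closeIndex = None
-- 	for i in range(start + 1, len(elementsList)):
-- 		tok = elementsList[i]
-- 		if tok == "{":
-- 			depth += 1
-- 		elif tok == "}":
-- 			if depth == 0:
-- 				closeIndex = i
-- 				break
-- 			depth -= 1
-- 	if closeIndex is None:
-- 		return None
-- 	# Pass 2: count depth-0 separators strictly before the closing brace.
-- 	depth = 0
-- 	count = 0
-- 	for i in range(start + 1, closeIndex):
-- 		tok = elementsList[i]
-- 		if tok == "{":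
-- 			depth += 1
-- 		elif tok == "}":
-- 			depth -= 1
-- 		elif tok == "/" and depth == 0:
-- 			count += 1
-- 	return count + 1
-- ===== Notes on version B (the rewrite author's own statement) =====
-- stated objective: alternative
-- what changed: Replaces A's single fused state machine (one loop carrying both the brace-skip counter and the running segment count, returning from inside the loop) by two explicit passes: one scan that only locates the matching closing brace, then a second scan over the enclosed slice that recomputes depth and counts depth-0 '/' separators.
import Mathlib
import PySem

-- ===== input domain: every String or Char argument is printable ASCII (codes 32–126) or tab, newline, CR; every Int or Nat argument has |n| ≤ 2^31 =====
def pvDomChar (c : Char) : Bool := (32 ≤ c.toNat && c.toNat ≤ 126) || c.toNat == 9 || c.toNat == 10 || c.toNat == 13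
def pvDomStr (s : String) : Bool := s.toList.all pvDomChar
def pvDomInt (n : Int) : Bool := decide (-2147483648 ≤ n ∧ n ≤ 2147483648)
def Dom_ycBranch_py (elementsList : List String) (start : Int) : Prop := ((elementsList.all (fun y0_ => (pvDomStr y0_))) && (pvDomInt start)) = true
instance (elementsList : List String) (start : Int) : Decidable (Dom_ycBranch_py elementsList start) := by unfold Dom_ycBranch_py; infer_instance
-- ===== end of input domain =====

-- B replaces A's single fused state machine by two explicit passes (find the matching
-- closing brace, then re-scan the enclosed slice counting depth-0 separators); alternative
-- decomposition, same cost. Pre_ excludes inputs where A raises IndexError.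


-- ===== PORT A =====
-- A's fused loop: one pass over the index range carrying (skipBrace, segments);
-- pyGet? none = IndexError (outside Pre_), the port returns none there.
def ycGoA (xs : List String) : List Int → Int → Int → Option Int
  | [], _, _ => none
  | i :: rest, skip, seg =>
    match PySem.List.pyGet? xs i with
    | none => none
    | some t =>
      if t == "}" then
        if skip == 0 then some (seg + 1) else ycGoA xs rest (skip - 1) seg
      else if t == "{" then ycGoA xs rest (skip + 1) seg
      else if t == "/" then
        ycGoA xs rest skip (if skip == 0 then seg + 1 else seg)
      else ycGoA xs rest skip seg

def ycBranch_py (elementsList : List String) (start : Int) : Option Int :=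
  ycGoA elementsList (PySem.List.pyRange (start + 1) elementsList.length 1) 0 0

-- ===== PORT B =====
-- Pass 1: locate the matching closing brace (depth-0 '}').
def ycFindClose (xs : List String) : List Int → Int → Option Int
  | [], _ => none
  | i :: rest, depth =>
    match PySem.List.pyGet? xs i with
    | none => none
    | some t =>
      if t == "{" then ycFindClose xs rest (depth + 1)
      else if t == "}" then
        if depth == 0 then some i else ycFindClose xs rest (depth - 1)
      else ycFindClose xs rest depth

-- Pass 2: count depth-0 '/' separators over the slice before the closing brace.
def ycCount (xs : List String) : List Int → Int → Int → Int
  | [], _, acc => acc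
  | i :: rest, depth, acc =>
    match PySem.List.pyGet? xs i with
    | none => ycCount xs rest depth acc
    | some t =>
      if t == "{" then ycCount xs rest (depth + 1) acc
      else if t == "}" then ycCount xs rest (depth - 1) acc
      else if t == "/" then
        ycCount xs rest depth (if depth == 0 then acc + 1 else acc)
      else ycCount xs rest depth acc

def ycBranch_py_alt (elementsList : List String) (start : Int) : Option Int :=
  match ycFindClose elementsList (PySem.List.pyRange (start + 1) elementsList.length 1) 0 with
  | none => none
  | some c =>
      some (ycCount elementsList (PySem.List.pyRange (start + 1) c 1) 0 0 + 1)

-- ===== PRECONDITION & SPEC =====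
-- Pre_ excludes exactly the inputs where Python A raises IndexError: a nonempty index
-- range starting below -len(elementsList) (negative-index wraparound past the front).
def Pre_ycBranch_py (elementsList : List String) (start : Int) : Prop :=
  -(elementsList.length : Int) ≤ start + 1 ∨ (elementsList.length : Int) ≤ start + 1
instance (elementsList : List String) (start : Int) : Decidable (Pre_ycBranch_py elementsList start) := by unfold Pre_ycBranch_py; infer_instance

def pvWitness_ycBranch_py : List String × Int := (["a", "/", "b", "/", "c", "}"], -1)

def Spec_ycBranch_py (elementsList : List String) (start : Int) (out : Option Int) : Prop := out = ycBranch_py_alt elementsList start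
instance (elementsList : List String) (start : Int) (out : Option Int) : Decidable (Spec_ycBranch_py elementsList start out) := by unfold Spec_ycBranch_py; infer_instance

-- ===== CLAIM (what is proved, stated in full; the proofs are below) =====
def Claim_equal_ycBranch_py : Prop := ∀ (elementsList : List String) (start : Int), Dom_ycBranch_py elementsList start → Pre_ycBranch_py elementsList start → Spec_ycBranch_py elementsList start (ycBranch_py elementsList start)

-- ===== LEMMAS AND PROOFS =====

theorem ycFindClose_mem (xs : List String) (idxs : List Int) (d c : Int)
    (h : ycFindClose xs idxs d = some c) : c ∈ idxs := by
  induction idxs generalizing d with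
  | nil => simp [ycFindClose] at h
  | cons i rest ih =>
    unfold ycFindClose at h
    cases hg : PySem.List.pyGet? xs i with
    | none => simp [hg] at h
    | some t =>
      simp only [hg] at h
      split_ifs at h with h1 h2 h3
      · exact List.mem_cons_of_mem _ (ih _ h)
      · simp_all
      · exact List.mem_cons_of_mem _ (ih _ h)
      · exact List.mem_cons_of_mem _ (ih _ h)

theorem ycCount_acc (xs : List String) (idxs : List Int) (d acc : Int) :
    ycCount xs idxs d acc = acc + ycCount xs idxs d 0 := by
  induction idxs generalizing d acc with
  | nil => simp [ycCount]
  | cons i rest ih =>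
    unfold ycCount
    cases hg : PySem.List.pyGet? xs i with
    | none => exact ih _ _
    | some t =>
      simp only
      split_ifs with h1 h2 h3 h4 <;>
        first
          | exact ih _ _
          | (rw [ih d (acc + 1), ih d (0 + 1)]; ring)

-- Main invariant: the fused loop over pyRange a L 1 equals "find the close, then count".
theorem ycMain (xs : List String) (a d seg : Int) :
    ycGoA xs (PySem.List.pyRange a xs.length 1) d seg =
      match ycFindClose xs (PySem.List.pyRange a xs.length 1) d with
      | none => none
      | some c => some (seg + ycCount xs (PySem.List.pyRange a c 1) d 0 + 1) := by
  by_cases hL : (xs.length : Int) ≤ a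
  · rw [PySem.List.pyRange_one_eq_nil hL]; simp [ycGoA, ycFindClose]
  · have hL' : a < (xs.length : Int) := by omega
    rw [PySem.List.pyRange_one_cons hL']
    simp only [ycGoA, ycFindClose]
    cases hg : PySem.List.pyGet? xs a with
    | none => simp
    | some t =>
      simp only
      have ih := fun d seg => ycMain xs (a + 1) d seg
      by_cases h1 : t = "}"
      · subst h1
        by_cases hd : d = 0
        · simp [hd, ycCount, PySem.List.pyRange_one_eq_nil]
        · simp only [hd, beq_self_eq_true, if_true, beq_iff_eq,
            String.reduceEq, if_false]
          rw [ih (d - 1) seg]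
          cases hf : ycFindClose xs (PySem.List.pyRange (a + 1) xs.length 1) (d - 1) with
          | none => simp
          | some c =>
            dsimp only
            have hc : a + 1 ≤ c :=
              (PySem.List.mem_pyRange_one.mp (ycFindClose_mem xs _ _ _ hf)).1
            rw [PySem.List.pyRange_one_cons (by omega : a < c)]
            simp only [ycCount, hg]
            simp
      · by_cases h2 : t = "{"
        · subst h2
          simp only [beq_self_eq_true, if_true, beq_iff_eq, String.reduceEq, if_false]
          rw [ih (d + 1) seg]
          cases hf : ycFindClose xs (PySem.List.pyRange (a + 1) xs.length 1) (d + 1) with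
          | none => simp
          | some c =>
            dsimp only
            have hc : a + 1 ≤ c :=
              (PySem.List.mem_pyRange_one.mp (ycFindClose_mem xs _ _ _ hf)).1
            rw [PySem.List.pyRange_one_cons (by omega : a < c)]
            simp only [ycCount, hg]
            simp
        · by_cases h3 : t = "/"
          · subst h3
            simp only [beq_self_eq_true, if_true, beq_iff_eq, String.reduceEq, if_false]
            rw [ih d (if d = 0 then seg + 1 else seg)]
            cases hf : ycFindClose xs (PySem.List.pyRange (a + 1) xs.length 1) d with
            | none => simp
            | some c =>
              dsimp only
              have hc : a + 1 ≤ c :=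
                (PySem.List.mem_pyRange_one.mp (ycFindClose_mem xs _ _ _ hf)).1
              rw [PySem.List.pyRange_one_cons (by omega : a < c)]
              simp only [ycCount, hg]
              by_cases hd : d = 0
              · simp only [hd, beq_iff_eq, String.reduceEq, if_false, if_true,
                  Option.some.injEq]
                rw [ycCount_acc xs _ 0 (0 + 1)]
                simp
                ring
              · simp [hd]
          · simp only [beq_iff_eq, if_neg h1, if_neg h2, if_neg h3]
            rw [ih d seg]
            cases hf : ycFindClose xs (PySem.List.pyRange (a + 1) xs.length 1) d with
            | none => simp
            | some c =>
              dsimp only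
              have hc : a + 1 ≤ c :=
                (PySem.List.mem_pyRange_one.mp (ycFindClose_mem xs _ _ _ hf)).1
              rw [PySem.List.pyRange_one_cons (by omega : a < c)]
              simp only [ycCount, hg]
              simp [h1, h2, h3]
termination_by (xs.length - a).toNat
decreasing_by all_goals omega

-- ===== VERDICT (by name: the statement is the Claim_ definition above) =====
theorem ycBranch_py_spec : Claim_equal_ycBranch_py := by
  intro xs start _ _
  unfold Spec_ycBranch_py ycBranch_py ycBranch_py_alt
  rw [ycMain xs (start + 1) 0 0]
  cases ycFindClose xs (PySem.List.pyRange (start + 1) xs.length 1) 0 with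
  | none => rfl
  | some c => simp
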